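-- pv_equiv track=rewrite | github.com/Medcurity1/medcurity-client-dashboard-1 | app.py | apply_acronyms
-- ===== SOURCE A (Python) =====
-- def apply_acronyms(text: str) -> str:
--     value = text
--     replacements = {
--         "Sra": "SRA",
--         "Nva": "NVA",
--         "Baa": "BAA",
--         "Ecd": "ECD",
--         "Acd": "ACD",
--     }
--     for source, target in replacements.items():
--         value = value.replace(source, target)
--     return value
-- ===== SOURCE B (Python) =====
-- def apply_acronyms(text: str) -> str:
--     mapping = {
--         "Sra": "SRA",
--         "Nva": "NVA",
--         "Baa": "BAA",
--         "Ecd": "ECD",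
--         "Acd": "ACD",
--     }
--     out = []
--     i = 0
--     n = len(text)
--     while i < n:
--         chunk = text[i:i + 3]
--         if chunk in mapping:
--             out.append(mapping[chunk])
--             i += 3
--         else:
--             out.append(text[i])
--             i += 1
--     return "".join(out)
-- ===== Notes on version B (the rewrite author's own statement) =====
-- stated objective: alternative
-- what changed: Replaces five sequential full-string str.replace passes by a single left-to-right scan that looks the 3-char window up in a dict and emits the replacement or the character.
-- intended difference: On texts containing "Sracd", "Nvacd" or "Baacd", A's last pass re-matches the 'A' that an earlier replacement just created (A("Sracd")="SRACD") while B uppercases only acronyms present in the input (B("Sracd")="SRAcd"), which is the intended behaviour: "cd" alone is not the Acd acronym. — e.g. on apply_acronyms("Sracd"): A returns "SRACD", B returns "SRAcd"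
import Mathlib
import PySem

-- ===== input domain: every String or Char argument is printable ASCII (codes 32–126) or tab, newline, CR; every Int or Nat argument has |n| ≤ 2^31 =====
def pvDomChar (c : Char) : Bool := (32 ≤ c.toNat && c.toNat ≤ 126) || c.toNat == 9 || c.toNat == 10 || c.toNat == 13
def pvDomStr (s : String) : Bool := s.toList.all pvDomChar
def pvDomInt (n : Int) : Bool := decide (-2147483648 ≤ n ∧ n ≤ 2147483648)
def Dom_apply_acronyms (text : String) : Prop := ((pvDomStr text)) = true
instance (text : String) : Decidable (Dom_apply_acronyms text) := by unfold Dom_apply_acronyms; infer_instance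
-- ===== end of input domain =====

-- B replaces A's five sequential str.replace passes by one left-to-right table-driven scan;
-- on texts containing "Sracd"/"Nvacd"/"Baacd" A's cascading passes differ (see D_ below).

-- ===== PORT A =====
def apply_acronyms (text : String) : String :=
  -- value = text; loop over replacements.items() applying value.replace(source, target)
  let replacements : PySem.Dict String String := PySem.Dict.ofList
    [("Sra", "SRA"), ("Nva", "NVA"), ("Baa", "BAA"), ("Ecd", "ECD"), ("Acd", "ACD")]
  replacements.items.foldl (fun value st => PySem.Str.replace value st.1 st.2) text

-- ===== PORT B =====
-- Source B's mapping dict, keys/values as char lists (text[i:i+3] is a char-list slice here)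
def acrMap : PySem.Dict (List Char) (List Char) := PySem.Dict.ofList
  [(['S','r','a'], ['S','R','A']), (['N','v','a'], ['N','V','A']), (['B','a','a'], ['B','A','A']),
   (['E','c','d'], ['E','C','D']), (['A','c','d'], ['A','C','D'])]

-- Source B's while-loop over index i, ported as structural recursion on the unprocessed suffix
-- (the 3-char window text[i:i+3] is the first three chars; a hit skips 3, a miss emits one char;
-- with fewer than 3 chars left the window is shorter than every key and never matches, so the
-- remaining chars are copied verbatim); exact on every input
def applyAcrGo : List Char → List Char
  | c1 :: c2 :: c3 :: t =>
    match PySem.Dict.get? acrMap [c1, c2, c3] with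
    | some tgt => tgt ++ applyAcrGo t
    | none => c1 :: applyAcrGo (c2 :: c3 :: t)
  | l => l

-- "".join(out) over the emitted chunks = the concatenated char list, rebuilt as a String
def apply_acronyms_alt (text : String) : String :=
  String.ofList (applyAcrGo text.toList)

-- ===== PRECONDITION & SPEC =====
-- On texts containing "Sracd", "Nvacd" or "Baacd", A's last pass re-matches the 'A' created by an
-- earlier replacement (A "Sracd" = "SRACD") while B uppercases only acronyms actually present in the
-- input (B "Sracd" = "SRAcd"), which is the intended behaviour: "cd" alone is not the Acd acronym.
-- linear scan for one of the three substrings (kernel-evaluable on large inputs)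
def hasBadTriple : List Char → Bool
  | [] => false
  | c :: t =>
    (c == 'S' && "racd".toList.isPrefixOf t) || (c == 'N' && "vacd".toList.isPrefixOf t) ||
      (c == 'B' && "aacd".toList.isPrefixOf t) || hasBadTriple t

def D_apply_acronyms (text : String) : Prop := hasBadTriple text.toList = true
instance (text : String) : Decidable (D_apply_acronyms text) := by
  unfold D_apply_acronyms; infer_instance

def Spec_apply_acronyms (text : String) (out : String) : Prop :=
  ¬ D_apply_acronyms text → out = apply_acronyms_alt text
instance (text : String) (out : String) : Decidable (Spec_apply_acronyms text out) := by
  unfold Spec_apply_acronyms; infer_instance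

def pvDiffWitness_apply_acronyms : String := "Sracd"
def pvDiffWitnessOut_apply_acronyms : String × String := ("SRACD", "SRAcd")

-- ===== CLAIM (what is proved, stated in full; the proofs are below) =====
def Claim_unchanged_apply_acronyms : Prop :=
  ∀ (text : String), Dom_apply_acronyms text → Spec_apply_acronyms text (apply_acronyms text)
def Claim_changed_apply_acronyms : Prop :=
  Dom_apply_acronyms (pvDiffWitness_apply_acronyms) ∧ D_apply_acronyms (pvDiffWitness_apply_acronyms) ∧
    apply_acronyms (pvDiffWitness_apply_acronyms) = pvDiffWitnessOut_apply_acronyms.1 ∧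
    apply_acronyms_alt (pvDiffWitness_apply_acronyms) = pvDiffWitnessOut_apply_acronyms.2 ∧
    pvDiffWitnessOut_apply_acronyms.1 ≠ pvDiffWitnessOut_apply_acronyms.2
def Claim_exact_apply_acronyms : Prop :=
  ∀ (text : String), Dom_apply_acronyms text → D_apply_acronyms text →
    apply_acronyms text ≠ apply_acronyms_alt text

-- ===== LEMMAS AND PROOFS =====

def repl (old new : List Char) : List Char → List Char
  | [] => []
  | c :: t =>
    if old.isPrefixOf (c :: t) ∧ old ≠ [] then new ++ repl old new (t.drop (old.length - 1))
    else c :: repl old new t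
termination_by l => l.length
decreasing_by all_goals (simp only [List.length_drop, List.length_cons]; omega)

theorem replace_go_eq (old new : List Char) (h : old ≠ []) :
    ∀ (fuel : Nat) (l acc : List Char), l.length ≤ fuel →
      PySem.Chars.replace.go old new fuel l acc = acc.reverse ++ repl old new l := by
  intro fuel
  induction fuel with
  | zero =>
    intro l acc hl
    have : l = [] := List.eq_nil_of_length_eq_zero (Nat.le_zero.mp hl)
    subst this
    simp [PySem.Chars.replace.go, repl]
  | succ f ih =>
    intro l acc hl
    cases l with
    | nil => simp [PySem.Chars.replace.go, repl]
    | cons c t =>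
      rw [PySem.Chars.replace.go]
      by_cases hp : old.isPrefixOf (c :: t) = true
      · rw [if_pos hp]
        obtain ⟨o, o', rfl⟩ : ∃ o o', old = o :: o' := by
          cases old with | nil => exact absurd rfl h | cons a b => exact ⟨a, b, rfl⟩
        have hdrop : List.drop (o :: o').length (c :: t) = t.drop o'.length := by
          simp [List.length_cons]
        rw [hdrop, ih _ _ (by simp at hl ⊢; omega)]
        rw [repl]
        rw [if_pos ⟨hp, h⟩]
        simp [List.length_cons]
      · rw [if_neg hp, ih _ _ (by simp at hl ⊢; omega)]
        rw [repl]
        rw [if_neg (by rintro ⟨h1, -⟩; exact hp h1)]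
        simp

theorem replace_eq_repl (old new l : List Char) (h : old ≠ []) :
    PySem.Chars.replace l old new = repl old new l := by
  unfold PySem.Chars.replace
  rw [if_neg (by simpa using h)]
  simpa using replace_go_eq old new h l.length l [] le_rfl

theorem repl_nil (old new : List Char) : repl old new [] = [] := by rw [repl]

theorem repl_skip (old new : List Char) (c : Char) (t : List Char) (h : ¬ old <+: (c :: t)) :
    repl old new (c :: t) = c :: repl old new t := by
  rw [repl, if_neg (by rintro ⟨h1, -⟩; exact h (List.isPrefixOf_iff_prefix.mp h1))]

theorem repl_match (x y z : Char) (new t : List Char) :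
    repl [x, y, z] new (x :: y :: z :: t) = new ++ repl [x, y, z] new t := by
  rw [repl, if_pos ⟨by simp [List.isPrefixOf], by simp⟩]
  simp [List.drop]

theorem repl_head (o0 o1 o2 n0 : Char) (n' : List Char) (ch : Char) (m : List Char)
    (h1 : o0 ≠ ch) (h2 : n0 ≠ ch) :
    ([ch] <+: repl [o0, o1, o2] (n0 :: n') m ↔ [ch] <+: m) := by
  cases m with
  | nil => rw [repl_nil]
  | cons c t =>
    by_cases hp : [o0, o1, o2] <+: (c :: t)
    · have hc : c = o0 := by
        rcases hp with ⟨w, hw⟩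
        simpa using congrArg (·.head?) hw.symm
      rw [repl, if_pos ⟨List.isPrefixOf_iff_prefix.mpr hp, by simp⟩]
      constructor
      · rintro ⟨w, hw⟩
        have hh : ch = n0 := by simpa using congrArg (·.head?) hw
        exact (h2 hh.symm).elim
      · rintro ⟨w, hw⟩
        have : c = ch := by simpa using congrArg (·.head?) hw.symm
        exact absurd (hc ▸ this) h1
    · rw [repl_skip _ _ _ _ hp]
      simp [List.cons_prefix_cons]

theorem repl_pair (o0 o1 o2 n0 n1 n2 x y : Char) (m : List Char)
    (hx1 : o0 ≠ x) (hx2 : n0 ≠ x) (hy1 : o0 ≠ y) (hy2 : n0 ≠ y) :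
    ([x, y] <+: repl [o0, o1, o2] [n0, n1, n2] m ↔ [x, y] <+: m) := by
  cases m with
  | nil => rw [repl_nil]
  | cons c t =>
    by_cases hp : [o0, o1, o2] <+: (c :: t)
    · have hc : c = o0 := by
        rcases hp with ⟨w, hw⟩
        simpa using congrArg (·.head?) hw.symm
      rw [repl, if_pos ⟨List.isPrefixOf_iff_prefix.mpr hp, by simp⟩]
      simp only [List.cons_append, List.cons_prefix_cons]
      constructor
      · rintro ⟨hxx, -⟩; exact absurd hxx.symm hx2
      · rintro ⟨hxx, -⟩; exact absurd (hc ▸ hxx).symm hx1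
    · rw [repl_skip _ _ _ _ hp]
      simp only [List.cons_prefix_cons]
      exact and_congr_right fun _ => repl_head o0 o1 o2 n0 [n1, n2] y t hy1 hy2

theorem altGo_S (t : List Char) : applyAcrGo ('S'::'r'::'a'::t) = 'S'::'R'::'A'::applyAcrGo t := rfl
theorem altGo_N (t : List Char) : applyAcrGo ('N'::'v'::'a'::t) = 'N'::'V'::'A'::applyAcrGo t := rfl
theorem altGo_B (t : List Char) : applyAcrGo ('B'::'a'::'a'::t) = 'B'::'A'::'A'::applyAcrGo t := rfl
theorem altGo_E (t : List Char) : applyAcrGo ('E'::'c'::'d'::t) = 'E'::'C'::'D'::applyAcrGo t := rfl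
theorem altGo_A (t : List Char) : applyAcrGo ('A'::'c'::'d'::t) = 'A'::'C'::'D'::applyAcrGo t := rfl

theorem altGo_skip (c : Char) (t : List Char)
    (hS : ¬ ['S','r','a'] <+: (c :: t)) (hN : ¬ ['N','v','a'] <+: (c :: t))
    (hB : ¬ ['B','a','a'] <+: (c :: t)) (hE : ¬ ['E','c','d'] <+: (c :: t))
    (hA : ¬ ['A','c','d'] <+: (c :: t)) :
    applyAcrGo (c :: t) = c :: applyAcrGo t := by
  match t with
  | [] => rfl
  | [c2] => rfl
  | c2 :: c3 :: t' =>
    show (match PySem.Dict.get? acrMap [c, c2, c3] with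
      | some tgt => tgt ++ applyAcrGo t'
      | none => c :: applyAcrGo (c2 :: c3 :: t')) = _
    have h1 : ['S','r','a'] ≠ [c, c2, c3] := fun h => hS ⟨t', by rw [h]; rfl⟩
    have h2 : ['N','v','a'] ≠ [c, c2, c3] := fun h => hN ⟨t', by rw [h]; rfl⟩
    have h3 : ['B','a','a'] ≠ [c, c2, c3] := fun h => hB ⟨t', by rw [h]; rfl⟩
    have h4 : ['E','c','d'] ≠ [c, c2, c3] := fun h => hE ⟨t', by rw [h]; rfl⟩
    have h5 : ['A','c','d'] ≠ [c, c2, c3] := fun h => hA ⟨t', by rw [h]; rfl⟩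
    have hitems : acrMap.items =
        [(['S','r','a'], ['S','R','A']), (['N','v','a'], ['N','V','A']), (['B','a','a'], ['B','A','A']),
         (['E','c','d'], ['E','C','D']), (['A','c','d'], ['A','C','D'])] := by decide
    have hget : PySem.Dict.get? acrMap [c, c2, c3] = none := by
      rw [PySem.Dict.get?, hitems]
      rw [List.find?_eq_none.mpr ?_]
      · rfl
      · rintro p hp
        simp only [List.mem_cons, List.not_mem_nil, or_false] at hp
        rcases hp with rfl | rfl | rfl | rfl | rfl
        · simpa using fun a b cc => h1 (by simp; exact ⟨a, b, cc⟩)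
        · simpa using fun a b cc => h2 (by simp; exact ⟨a, b, cc⟩)
        · simpa using fun a b cc => h3 (by simp; exact ⟨a, b, cc⟩)
        · simpa using fun a b cc => h4 (by simp; exact ⟨a, b, cc⟩)
        · simpa using fun a b cc => h5 (by simp; exact ⟨a, b, cc⟩)
    rw [hget]

theorem repl_pass3 (o0 o1 o2 : Char) (new : List Char) (u0 u1 u2 : Char) (x : List Char)
    (g0 : ¬ [o0,o1,o2] <+: (u0::u1::u2::x)) (g1 : ¬ [o0,o1,o2] <+: (u1::u2::x))
    (g2 : ¬ [o0,o1,o2] <+: (u2::x)) :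
    repl [o0,o1,o2] new (u0::u1::u2::x) = u0::u1::u2::repl [o0,o1,o2] new x := by
  rw [repl_skip _ _ _ _ g0, repl_skip _ _ _ _ g1, repl_skip _ _ _ _ g2]

-- ['c','d'] survives the first four passes unchanged
theorem pair_cd_chain (m : List Char) :
    (['c','d'] <+: repl ['E','c','d'] ['E','C','D'] (repl ['B','a','a'] ['B','A','A']
      (repl ['N','v','a'] ['N','V','A'] (repl ['S','r','a'] ['S','R','A'] m))) ↔ ['c','d'] <+: m) := by
  rw [repl_pair _ _ _ _ _ _ _ _ _ (by decide) (by decide) (by decide) (by decide),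
      repl_pair _ _ _ _ _ _ _ _ _ (by decide) (by decide) (by decide) (by decide),
      repl_pair _ _ _ _ _ _ _ _ _ (by decide) (by decide) (by decide) (by decide),
      repl_pair _ _ _ _ _ _ _ _ _ (by decide) (by decide) (by decide) (by decide)]

theorem pair_va_1 (m : List Char) :
    (['v','a'] <+: repl ['S','r','a'] ['S','R','A'] m ↔ ['v','a'] <+: m) :=
  repl_pair _ _ _ _ _ _ _ _ _ (by decide) (by decide) (by decide) (by decide)
theorem pair_aa_2 (m : List Char) :
    (['a','a'] <+: repl ['N','v','a'] ['N','V','A'] (repl ['S','r','a'] ['S','R','A'] m) ↔ ['a','a'] <+: m) := by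
  rw [repl_pair _ _ _ _ _ _ _ _ _ (by decide) (by decide) (by decide) (by decide),
      repl_pair _ _ _ _ _ _ _ _ _ (by decide) (by decide) (by decide) (by decide)]
theorem pair_cd_3 (m : List Char) :
    (['c','d'] <+: repl ['B','a','a'] ['B','A','A'] (repl ['N','v','a'] ['N','V','A']
      (repl ['S','r','a'] ['S','R','A'] m)) ↔ ['c','d'] <+: m) := by
  rw [repl_pair _ _ _ _ _ _ _ _ _ (by decide) (by decide) (by decide) (by decide),
      repl_pair _ _ _ _ _ _ _ _ _ (by decide) (by decide) (by decide) (by decide),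
      repl_pair _ _ _ _ _ _ _ _ _ (by decide) (by decide) (by decide) (by decide)]

theorem hasBadTriple_iff (l : List Char) : hasBadTriple l = true ↔
    (['S','r','a','c','d'] <:+: l ∨ ['N','v','a','c','d'] <:+: l ∨ ['B','a','a','c','d'] <:+: l) := by
  induction l with
  | nil => simp [hasBadTriple]
  | cons c t ih =>
    rw [hasBadTriple]
    rw [show ("racd" : String).toList = ['r','a','c','d'] from by decide,
        show ("vacd" : String).toList = ['v','a','c','d'] from by decide,
        show ("aacd" : String).toList = ['a','a','c','d'] from by decide]
    simp only [Bool.or_eq_true, Bool.and_eq_true, beq_iff_eq, List.isPrefixOf_iff_prefix, ih]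
    rw [List.infix_cons_iff, List.infix_cons_iff, List.infix_cons_iff]
    simp only [List.cons_prefix_cons]
    tauto

theorem chain_aux : ∀ (n : Nat) (l : List Char), l.length ≤ n →
    ¬ ['S','r','a','c','d'] <:+: l → ¬ ['N','v','a','c','d'] <:+: l → ¬ ['B','a','a','c','d'] <:+: l →
    repl ['A','c','d'] ['A','C','D'] (repl ['E','c','d'] ['E','C','D'] (repl ['B','a','a'] ['B','A','A']
      (repl ['N','v','a'] ['N','V','A'] (repl ['S','r','a'] ['S','R','A'] l)))) = applyAcrGo l := by
  intro n
  induction n with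
  | zero =>
    intro l hl _ _ _
    have : l = [] := List.eq_nil_of_length_eq_zero (Nat.le_zero.mp hl)
    subst this
    simp [repl_nil, applyAcrGo]
  | succ n ih =>
    intro l hl h1 h2 h3
    by_cases hS : ['S','r','a'] <+: l
    · obtain ⟨m, rfl⟩ := hS
      have hcdm : ¬ ['c','d'] <+: m := by
        rintro ⟨w, hw⟩
        exact h1 ⟨[], w, by rw [← hw]; simp⟩
      have hcdx : ¬ ['c','d'] <+: (repl ['E','c','d'] ['E','C','D'] (repl ['B','a','a'] ['B','A','A']
          (repl ['N','v','a'] ['N','V','A'] (repl ['S','r','a'] ['S','R','A'] m)))) := by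
        rw [pair_cd_chain]; exact hcdm
      show repl _ _ (repl _ _ (repl _ _ (repl _ _ (repl _ _ ('S'::'r'::'a'::m))))) = applyAcrGo ('S'::'r'::'a'::m)
      rw [repl_match]
      simp only [List.cons_append, List.nil_append]
      rw [repl_pass3 _ _ _ _ _ _ _ _ (by simp [List.cons_prefix_cons]) (by simp [List.cons_prefix_cons]) (by simp [List.cons_prefix_cons])]
      rw [repl_pass3 _ _ _ _ _ _ _ _ (by simp [List.cons_prefix_cons]) (by simp [List.cons_prefix_cons]) (by simp [List.cons_prefix_cons])]
      rw [repl_pass3 _ _ _ _ _ _ _ _ (by simp [List.cons_prefix_cons]) (by simp [List.cons_prefix_cons]) (by simp [List.cons_prefix_cons])]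
      rw [repl_pass3 _ _ _ _ _ _ _ _ (by simp [List.cons_prefix_cons]) (by simp [List.cons_prefix_cons]) (by simp [List.cons_prefix_cons]; exact hcdx)]
      rw [altGo_S]
      have hsuf : m <:+ ('S'::'r'::'a'::m) := ⟨['S','r','a'], rfl⟩
      rw [ih m (by simp at hl; omega) (fun hb => h1 (hb.trans hsuf.isInfix))
          (fun hb => h2 (hb.trans hsuf.isInfix)) (fun hb => h3 (hb.trans hsuf.isInfix))]
    · by_cases hN : ['N','v','a'] <+: l
      · obtain ⟨m, rfl⟩ := hN
        have hcdm : ¬ ['c','d'] <+: m := by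
          rintro ⟨w, hw⟩
          exact h2 ⟨[], w, by rw [← hw]; simp⟩
        have hcdx : ¬ ['c','d'] <+: (repl ['E','c','d'] ['E','C','D'] (repl ['B','a','a'] ['B','A','A']
            (repl ['N','v','a'] ['N','V','A'] (repl ['S','r','a'] ['S','R','A'] m)))) := by
          rw [pair_cd_chain]; exact hcdm
        show repl _ _ (repl _ _ (repl _ _ (repl _ _ (repl _ _ ('N'::'v'::'a'::m))))) = applyAcrGo ('N'::'v'::'a'::m)
        rw [repl_pass3 _ _ _ _ _ _ _ _ (by simp [List.cons_prefix_cons]) (by simp [List.cons_prefix_cons]) (by simp [List.cons_prefix_cons])]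
        rw [repl_match]
        simp only [List.cons_append, List.nil_append]
        rw [repl_pass3 _ _ _ _ _ _ _ _ (by simp [List.cons_prefix_cons]) (by simp [List.cons_prefix_cons]) (by simp [List.cons_prefix_cons])]
        rw [repl_pass3 _ _ _ _ _ _ _ _ (by simp [List.cons_prefix_cons]) (by simp [List.cons_prefix_cons]) (by simp [List.cons_prefix_cons])]
        rw [repl_pass3 _ _ _ _ _ _ _ _ (by simp [List.cons_prefix_cons]) (by simp [List.cons_prefix_cons]) (by simp [List.cons_prefix_cons]; exact hcdx)]
        rw [altGo_N]
        have hsuf : m <:+ ('N'::'v'::'a'::m) := ⟨['N','v','a'], rfl⟩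
        rw [ih m (by simp at hl; omega) (fun hb => h1 (hb.trans hsuf.isInfix))
            (fun hb => h2 (hb.trans hsuf.isInfix)) (fun hb => h3 (hb.trans hsuf.isInfix))]
      · by_cases hB : ['B','a','a'] <+: l
        · obtain ⟨m, rfl⟩ := hB
          have hcdm : ¬ ['c','d'] <+: m := by
            rintro ⟨w, hw⟩
            exact h3 ⟨[], w, by rw [← hw]; simp⟩
          have hcdx : ¬ ['c','d'] <+: (repl ['E','c','d'] ['E','C','D'] (repl ['B','a','a'] ['B','A','A']
              (repl ['N','v','a'] ['N','V','A'] (repl ['S','r','a'] ['S','R','A'] m)))) := by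
            rw [pair_cd_chain]; exact hcdm
          show repl _ _ (repl _ _ (repl _ _ (repl _ _ (repl _ _ ('B'::'a'::'a'::m))))) = applyAcrGo ('B'::'a'::'a'::m)
          rw [repl_pass3 _ _ _ _ _ _ _ _ (by simp [List.cons_prefix_cons]) (by simp [List.cons_prefix_cons]) (by simp [List.cons_prefix_cons])]
          rw [repl_pass3 _ _ _ _ _ _ _ _ (by simp [List.cons_prefix_cons]) (by simp [List.cons_prefix_cons]) (by simp [List.cons_prefix_cons])]
          rw [repl_match]
          simp only [List.cons_append, List.nil_append]
          rw [repl_pass3 _ _ _ _ _ _ _ _ (by simp [List.cons_prefix_cons]) (by simp [List.cons_prefix_cons]) (by simp [List.cons_prefix_cons])]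
          rw [repl_pass3 _ _ _ _ _ _ _ _ (by simp [List.cons_prefix_cons]) (by simp [List.cons_prefix_cons]) (by simp [List.cons_prefix_cons]; exact hcdx)]
          rw [altGo_B]
          have hsuf : m <:+ ('B'::'a'::'a'::m) := ⟨['B','a','a'], rfl⟩
          rw [ih m (by simp at hl; omega) (fun hb => h1 (hb.trans hsuf.isInfix))
              (fun hb => h2 (hb.trans hsuf.isInfix)) (fun hb => h3 (hb.trans hsuf.isInfix))]
        · by_cases hE : ['E','c','d'] <+: l
          · obtain ⟨m, rfl⟩ := hE
            show repl _ _ (repl _ _ (repl _ _ (repl _ _ (repl _ _ ('E'::'c'::'d'::m))))) = applyAcrGo ('E'::'c'::'d'::m)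
            rw [repl_pass3 _ _ _ _ _ _ _ _ (by simp [List.cons_prefix_cons]) (by simp [List.cons_prefix_cons]) (by simp [List.cons_prefix_cons])]
            rw [repl_pass3 _ _ _ _ _ _ _ _ (by simp [List.cons_prefix_cons]) (by simp [List.cons_prefix_cons]) (by simp [List.cons_prefix_cons])]
            rw [repl_pass3 _ _ _ _ _ _ _ _ (by simp [List.cons_prefix_cons]) (by simp [List.cons_prefix_cons]) (by simp [List.cons_prefix_cons])]
            rw [repl_match]
            simp only [List.cons_append, List.nil_append]
            rw [repl_pass3 _ _ _ _ _ _ _ _ (by simp [List.cons_prefix_cons]) (by simp [List.cons_prefix_cons]) (by simp [List.cons_prefix_cons])]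
            rw [altGo_E]
            have hsuf : m <:+ ('E'::'c'::'d'::m) := ⟨['E','c','d'], rfl⟩
            rw [ih m (by simp at hl; omega) (fun hb => h1 (hb.trans hsuf.isInfix))
                (fun hb => h2 (hb.trans hsuf.isInfix)) (fun hb => h3 (hb.trans hsuf.isInfix))]
          · by_cases hA : ['A','c','d'] <+: l
            · obtain ⟨m, rfl⟩ := hA
              show repl _ _ (repl _ _ (repl _ _ (repl _ _ (repl _ _ ('A'::'c'::'d'::m))))) = applyAcrGo ('A'::'c'::'d'::m)
              rw [repl_pass3 _ _ _ _ _ _ _ _ (by simp [List.cons_prefix_cons]) (by simp [List.cons_prefix_cons]) (by simp [List.cons_prefix_cons])]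
              rw [repl_pass3 _ _ _ _ _ _ _ _ (by simp [List.cons_prefix_cons]) (by simp [List.cons_prefix_cons]) (by simp [List.cons_prefix_cons])]
              rw [repl_pass3 _ _ _ _ _ _ _ _ (by simp [List.cons_prefix_cons]) (by simp [List.cons_prefix_cons]) (by simp [List.cons_prefix_cons])]
              rw [repl_pass3 _ _ _ _ _ _ _ _ (by simp [List.cons_prefix_cons]) (by simp [List.cons_prefix_cons]) (by simp [List.cons_prefix_cons])]
              rw [repl_match]
              simp only [List.cons_append, List.nil_append]
              rw [altGo_A]
              have hsuf : m <:+ ('A'::'c'::'d'::m) := ⟨['A','c','d'], rfl⟩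
              rw [ih m (by simp at hl; omega) (fun hb => h1 (hb.trans hsuf.isInfix))
                  (fun hb => h2 (hb.trans hsuf.isInfix)) (fun hb => h3 (hb.trans hsuf.isInfix))]
            · cases l with
              | nil => simp [repl_nil, applyAcrGo]
              | cons c t =>
                have hsuf : t <:+ (c :: t) := ⟨[c], rfl⟩
                have gN : ¬ ['N','v','a'] <+: (c :: repl ['S','r','a'] ['S','R','A'] t) := by
                  intro hp
                  simp only [List.cons_prefix_cons] at hp
                  refine hN ?_
                  simp only [List.cons_prefix_cons]
                  exact ⟨hp.1, (pair_va_1 t).mp hp.2⟩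
                have gB : ¬ ['B','a','a'] <+: (c :: repl ['N','v','a'] ['N','V','A'] (repl ['S','r','a'] ['S','R','A'] t)) := by
                  intro hp
                  simp only [List.cons_prefix_cons] at hp
                  refine hB ?_
                  simp only [List.cons_prefix_cons]
                  exact ⟨hp.1, (pair_aa_2 t).mp hp.2⟩
                have gE : ¬ ['E','c','d'] <+: (c :: repl ['B','a','a'] ['B','A','A'] (repl ['N','v','a'] ['N','V','A'] (repl ['S','r','a'] ['S','R','A'] t))) := by
                  intro hp
                  simp only [List.cons_prefix_cons] at hp
                  refine hE ?_
                  simp only [List.cons_prefix_cons]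
                  exact ⟨hp.1, (pair_cd_3 t).mp hp.2⟩
                have gA : ¬ ['A','c','d'] <+: (c :: repl ['E','c','d'] ['E','C','D'] (repl ['B','a','a'] ['B','A','A'] (repl ['N','v','a'] ['N','V','A'] (repl ['S','r','a'] ['S','R','A'] t)))) := by
                  intro hp
                  simp only [List.cons_prefix_cons] at hp
                  refine hA ?_
                  simp only [List.cons_prefix_cons]
                  exact ⟨hp.1, (pair_cd_chain t).mp hp.2⟩
                rw [repl_skip _ _ _ _ hS, repl_skip _ _ _ _ gN, repl_skip _ _ _ _ gB,
                    repl_skip _ _ _ _ gE, repl_skip _ _ _ _ gA]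
                rw [altGo_skip c t hS hN hB hE hA]
                rw [ih t (by simp at hl; omega) (fun hb => h1 (hb.trans hsuf.isInfix))
                    (fun hb => h2 (hb.trans hsuf.isInfix)) (fun hb => h3 (hb.trans hsuf.isInfix))]

theorem altGo_c (u : List Char) : applyAcrGo ('c' :: u) = 'c' :: applyAcrGo u :=
  altGo_skip _ _ (by simp [List.cons_prefix_cons]) (by simp [List.cons_prefix_cons])
    (by simp [List.cons_prefix_cons]) (by simp [List.cons_prefix_cons]) (by simp [List.cons_prefix_cons])

theorem tight_aux : ∀ (n : Nat) (l : List Char), l.length ≤ n → hasBadTriple l = true →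
    repl ['A','c','d'] ['A','C','D'] (repl ['E','c','d'] ['E','C','D'] (repl ['B','a','a'] ['B','A','A']
      (repl ['N','v','a'] ['N','V','A'] (repl ['S','r','a'] ['S','R','A'] l)))) ≠ applyAcrGo l := by
  intro n
  induction n with
  | zero =>
    intro l hl hb
    have : l = [] := List.eq_nil_of_length_eq_zero (Nat.le_zero.mp hl)
    subst this
    simp [hasBadTriple] at hb
  | succ n ih =>
    intro l hl hb
    by_cases hS : ['S','r','a'] <+: l
    · obtain ⟨m, rfl⟩ := hS
      show repl _ _ (repl _ _ (repl _ _ (repl _ _ (repl _ _ ('S'::'r'::'a'::m))))) ≠ applyAcrGo ('S'::'r'::'a'::m)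
      rw [repl_match]
      simp only [List.cons_append, List.nil_append]
      rw [repl_pass3 _ _ _ _ _ _ _ _ (by simp [List.cons_prefix_cons]) (by simp [List.cons_prefix_cons]) (by simp [List.cons_prefix_cons])]
      rw [repl_pass3 _ _ _ _ _ _ _ _ (by simp [List.cons_prefix_cons]) (by simp [List.cons_prefix_cons]) (by simp [List.cons_prefix_cons])]
      rw [repl_pass3 _ _ _ _ _ _ _ _ (by simp [List.cons_prefix_cons]) (by simp [List.cons_prefix_cons]) (by simp [List.cons_prefix_cons])]
      by_cases hcd : ['c','d'] <+: m
      · obtain ⟨w, rfl⟩ := hcd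
        simp only [List.cons_append, List.nil_append]
        have hx4 : ['c','d'] <+: (repl ['E','c','d'] ['E','C','D'] (repl ['B','a','a'] ['B','A','A']
            (repl ['N','v','a'] ['N','V','A'] (repl ['S','r','a'] ['S','R','A'] ('c'::'d'::w))))) :=
          (pair_cd_chain _).mpr ⟨w, rfl⟩
        obtain ⟨y, hy⟩ := hx4
        rw [← hy]
        rw [repl_skip _ _ _ _ (by simp [List.cons_prefix_cons]),
            repl_skip _ _ _ _ (by simp [List.cons_prefix_cons])]
        simp only [List.cons_append]
        rw [repl_match]
        rw [altGo_S, altGo_c]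
        simp
      · have hbm : hasBadTriple m = true := by
          rw [hasBadTriple_iff] at hb
          rw [hasBadTriple_iff]
          simp only [List.cons_append, List.nil_append, List.infix_cons_iff, List.cons_prefix_cons] at hb
          tauto
        have hcdx : ¬ ['c','d'] <+: (repl ['E','c','d'] ['E','C','D'] (repl ['B','a','a'] ['B','A','A']
            (repl ['N','v','a'] ['N','V','A'] (repl ['S','r','a'] ['S','R','A'] m)))) := by
          rw [pair_cd_chain]; exact hcd
        rw [repl_pass3 _ _ _ _ _ _ _ _ (by simp [List.cons_prefix_cons]) (by simp [List.cons_prefix_cons]) (by simp [List.cons_prefix_cons]; exact hcdx)]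
        rw [altGo_S]
        intro hh
        refine ih m (by simp at hl; omega) hbm ?_
        simpa using hh
    · by_cases hN : ['N','v','a'] <+: l
      · obtain ⟨m, rfl⟩ := hN
        show repl _ _ (repl _ _ (repl _ _ (repl _ _ (repl _ _ ('N'::'v'::'a'::m))))) ≠ applyAcrGo ('N'::'v'::'a'::m)
        rw [repl_pass3 _ _ _ _ _ _ _ _ (by simp [List.cons_prefix_cons]) (by simp [List.cons_prefix_cons]) (by simp [List.cons_prefix_cons])]
        rw [repl_match]
        simp only [List.cons_append, List.nil_append]
        rw [repl_pass3 _ _ _ _ _ _ _ _ (by simp [List.cons_prefix_cons]) (by simp [List.cons_prefix_cons]) (by simp [List.cons_prefix_cons])]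
        rw [repl_pass3 _ _ _ _ _ _ _ _ (by simp [List.cons_prefix_cons]) (by simp [List.cons_prefix_cons]) (by simp [List.cons_prefix_cons])]
        by_cases hcd : ['c','d'] <+: m
        · obtain ⟨w, rfl⟩ := hcd
          simp only [List.cons_append, List.nil_append]
          have hx4 : ['c','d'] <+: (repl ['E','c','d'] ['E','C','D'] (repl ['B','a','a'] ['B','A','A']
              (repl ['N','v','a'] ['N','V','A'] (repl ['S','r','a'] ['S','R','A'] ('c'::'d'::w))))) :=
            (pair_cd_chain _).mpr ⟨w, rfl⟩
          obtain ⟨y, hy⟩ := hx4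
          rw [← hy]
          rw [repl_skip _ _ _ _ (by simp [List.cons_prefix_cons]),
              repl_skip _ _ _ _ (by simp [List.cons_prefix_cons])]
          simp only [List.cons_append]
          rw [repl_match]
          rw [altGo_N, altGo_c]
          simp
        · have hbm : hasBadTriple m = true := by
            rw [hasBadTriple_iff] at hb
            rw [hasBadTriple_iff]
            simp only [List.cons_append, List.nil_append, List.infix_cons_iff, List.cons_prefix_cons] at hb
            tauto
          have hcdx : ¬ ['c','d'] <+: (repl ['E','c','d'] ['E','C','D'] (repl ['B','a','a'] ['B','A','A']
              (repl ['N','v','a'] ['N','V','A'] (repl ['S','r','a'] ['S','R','A'] m)))) := by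
            rw [pair_cd_chain]; exact hcd
          rw [repl_pass3 _ _ _ _ _ _ _ _ (by simp [List.cons_prefix_cons]) (by simp [List.cons_prefix_cons]) (by simp [List.cons_prefix_cons]; exact hcdx)]
          rw [altGo_N]
          intro hh
          refine ih m (by simp at hl; omega) hbm ?_
          simpa using hh
      · by_cases hB : ['B','a','a'] <+: l
        · obtain ⟨m, rfl⟩ := hB
          show repl _ _ (repl _ _ (repl _ _ (repl _ _ (repl _ _ ('B'::'a'::'a'::m))))) ≠ applyAcrGo ('B'::'a'::'a'::m)
          rw [repl_pass3 _ _ _ _ _ _ _ _ (by simp [List.cons_prefix_cons]) (by simp [List.cons_prefix_cons]) (by simp [List.cons_prefix_cons])]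
          rw [repl_pass3 _ _ _ _ _ _ _ _ (by simp [List.cons_prefix_cons]) (by simp [List.cons_prefix_cons]) (by simp [List.cons_prefix_cons])]
          rw [repl_match]
          simp only [List.cons_append, List.nil_append]
          rw [repl_pass3 _ _ _ _ _ _ _ _ (by simp [List.cons_prefix_cons]) (by simp [List.cons_prefix_cons]) (by simp [List.cons_prefix_cons])]
          by_cases hcd : ['c','d'] <+: m
          · obtain ⟨w, rfl⟩ := hcd
            simp only [List.cons_append, List.nil_append]
            have hx4 : ['c','d'] <+: (repl ['E','c','d'] ['E','C','D'] (repl ['B','a','a'] ['B','A','A']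
                (repl ['N','v','a'] ['N','V','A'] (repl ['S','r','a'] ['S','R','A'] ('c'::'d'::w))))) :=
              (pair_cd_chain _).mpr ⟨w, rfl⟩
            obtain ⟨y, hy⟩ := hx4
            rw [← hy]
            rw [repl_skip _ _ _ _ (by simp [List.cons_prefix_cons]),
                repl_skip _ _ _ _ (by simp [List.cons_prefix_cons])]
            simp only [List.cons_append]
            rw [repl_match]
            rw [altGo_B, altGo_c]
            simp
          · have hbm : hasBadTriple m = true := by
              rw [hasBadTriple_iff] at hb
              rw [hasBadTriple_iff]
              simp only [List.cons_append, List.nil_append, List.infix_cons_iff, List.cons_prefix_cons] at hb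
              tauto
            have hcdx : ¬ ['c','d'] <+: (repl ['E','c','d'] ['E','C','D'] (repl ['B','a','a'] ['B','A','A']
                (repl ['N','v','a'] ['N','V','A'] (repl ['S','r','a'] ['S','R','A'] m)))) := by
              rw [pair_cd_chain]; exact hcd
            rw [repl_pass3 _ _ _ _ _ _ _ _ (by simp [List.cons_prefix_cons]) (by simp [List.cons_prefix_cons]) (by simp [List.cons_prefix_cons]; exact hcdx)]
            rw [altGo_B]
            intro hh
            refine ih m (by simp at hl; omega) hbm ?_
            simpa using hh
        · by_cases hE : ['E','c','d'] <+: l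
          · obtain ⟨m, rfl⟩ := hE
            have hbm : hasBadTriple m = true := by
              rw [hasBadTriple_iff] at hb
              rw [hasBadTriple_iff]
              simp only [List.cons_append, List.nil_append, List.infix_cons_iff, List.cons_prefix_cons] at hb
              tauto
            show repl _ _ (repl _ _ (repl _ _ (repl _ _ (repl _ _ ('E'::'c'::'d'::m))))) ≠ applyAcrGo ('E'::'c'::'d'::m)
            rw [repl_pass3 _ _ _ _ _ _ _ _ (by simp [List.cons_prefix_cons]) (by simp [List.cons_prefix_cons]) (by simp [List.cons_prefix_cons])]
            rw [repl_pass3 _ _ _ _ _ _ _ _ (by simp [List.cons_prefix_cons]) (by simp [List.cons_prefix_cons]) (by simp [List.cons_prefix_cons])]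
            rw [repl_pass3 _ _ _ _ _ _ _ _ (by simp [List.cons_prefix_cons]) (by simp [List.cons_prefix_cons]) (by simp [List.cons_prefix_cons])]
            rw [repl_match]
            simp only [List.cons_append, List.nil_append]
            rw [repl_pass3 _ _ _ _ _ _ _ _ (by simp [List.cons_prefix_cons]) (by simp [List.cons_prefix_cons]) (by simp [List.cons_prefix_cons])]
            rw [altGo_E]
            intro hh
            refine ih m (by simp at hl; omega) hbm ?_
            simpa using hh
          · by_cases hA : ['A','c','d'] <+: l
            · obtain ⟨m, rfl⟩ := hA
              have hbm : hasBadTriple m = true := by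
                rw [hasBadTriple_iff] at hb
                rw [hasBadTriple_iff]
                simp only [List.cons_append, List.nil_append, List.infix_cons_iff, List.cons_prefix_cons] at hb
                tauto
              show repl _ _ (repl _ _ (repl _ _ (repl _ _ (repl _ _ ('A'::'c'::'d'::m))))) ≠ applyAcrGo ('A'::'c'::'d'::m)
              rw [repl_pass3 _ _ _ _ _ _ _ _ (by simp [List.cons_prefix_cons]) (by simp [List.cons_prefix_cons]) (by simp [List.cons_prefix_cons])]
              rw [repl_pass3 _ _ _ _ _ _ _ _ (by simp [List.cons_prefix_cons]) (by simp [List.cons_prefix_cons]) (by simp [List.cons_prefix_cons])]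
              rw [repl_pass3 _ _ _ _ _ _ _ _ (by simp [List.cons_prefix_cons]) (by simp [List.cons_prefix_cons]) (by simp [List.cons_prefix_cons])]
              rw [repl_pass3 _ _ _ _ _ _ _ _ (by simp [List.cons_prefix_cons]) (by simp [List.cons_prefix_cons]) (by simp [List.cons_prefix_cons])]
              rw [repl_match]
              simp only [List.cons_append, List.nil_append]
              rw [altGo_A]
              intro hh
              refine ih m (by simp at hl; omega) hbm ?_
              simpa using hh
            · cases l with
              | nil => simp [hasBadTriple] at hb
              | cons c t =>
                have hbt : hasBadTriple t = true := by
                  rw [hasBadTriple_iff] at hb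
                  rw [hasBadTriple_iff]
                  simp only [List.infix_cons_iff] at hb
                  rcases hb with (h | h) | (h | h) | (h | h)
                  · exact absurd (List.IsPrefix.trans ⟨['c','d'], rfl⟩ h) hS
                  · exact Or.inl h
                  · exact absurd (List.IsPrefix.trans ⟨['c','d'], rfl⟩ h) hN
                  · exact Or.inr (Or.inl h)
                  · exact absurd (List.IsPrefix.trans ⟨['c','d'], rfl⟩ h) hB
                  · exact Or.inr (Or.inr h)
                have gN : ¬ ['N','v','a'] <+: (c :: repl ['S','r','a'] ['S','R','A'] t) := by
                  intro hp
                  simp only [List.cons_prefix_cons] at hp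
                  refine hN ?_
                  simp only [List.cons_prefix_cons]
                  exact ⟨hp.1, (pair_va_1 t).mp hp.2⟩
                have gB : ¬ ['B','a','a'] <+: (c :: repl ['N','v','a'] ['N','V','A'] (repl ['S','r','a'] ['S','R','A'] t)) := by
                  intro hp
                  simp only [List.cons_prefix_cons] at hp
                  refine hB ?_
                  simp only [List.cons_prefix_cons]
                  exact ⟨hp.1, (pair_aa_2 t).mp hp.2⟩
                have gE : ¬ ['E','c','d'] <+: (c :: repl ['B','a','a'] ['B','A','A'] (repl ['N','v','a'] ['N','V','A'] (repl ['S','r','a'] ['S','R','A'] t))) := by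
                  intro hp
                  simp only [List.cons_prefix_cons] at hp
                  refine hE ?_
                  simp only [List.cons_prefix_cons]
                  exact ⟨hp.1, (pair_cd_3 t).mp hp.2⟩
                have gA : ¬ ['A','c','d'] <+: (c :: repl ['E','c','d'] ['E','C','D'] (repl ['B','a','a'] ['B','A','A'] (repl ['N','v','a'] ['N','V','A'] (repl ['S','r','a'] ['S','R','A'] t)))) := by
                  intro hp
                  simp only [List.cons_prefix_cons] at hp
                  refine hA ?_
                  simp only [List.cons_prefix_cons]
                  exact ⟨hp.1, (pair_cd_chain t).mp hp.2⟩
                rw [repl_skip _ _ _ _ hS, repl_skip _ _ _ _ gN, repl_skip _ _ _ _ gB,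
                    repl_skip _ _ _ _ gE, repl_skip _ _ _ _ gA]
                rw [altGo_skip c t hS hN hB hE hA]
                intro hh
                refine ih t (by simp at hl; omega) hbt ?_
                simpa using hh

theorem apply_acronyms_spec : Claim_unchanged_apply_acronyms := by
  intro text _
  unfold Spec_apply_acronyms
  intro hD
  unfold D_apply_acronyms at hD
  rw [Bool.not_eq_true] at hD
  have hD' : ¬ (['S','r','a','c','d'] <:+: text.toList ∨ ['N','v','a','c','d'] <:+: text.toList ∨
      ['B','a','a','c','d'] <:+: text.toList) := by
    rw [← hasBadTriple_iff, hD]; simp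
  push Not at hD'
  obtain ⟨d1, d2, d3⟩ := hD' 
  show apply_acronyms text = apply_acronyms_alt text
  have hit : (PySem.Dict.ofList [(("Sra" : String), ("SRA" : String)), ("Nva", "NVA"),
      ("Baa", "BAA"), ("Ecd", "ECD"), ("Acd", "ACD")]).items
      = [("Sra", "SRA"), ("Nva", "NVA"), ("Baa", "BAA"), ("Ecd", "ECD"), ("Acd", "ACD")] := by decide
  simp only [apply_acronyms, apply_acronyms_alt, hit, List.foldl, PySem.Str.replace,
    String.toList_ofList]
  refine congrArg String.ofList ?_
  have eS : ("Sra" : String).toList = ['S','r','a'] := by decide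
  have eS' : ("SRA" : String).toList = ['S','R','A'] := by decide
  have eN : ("Nva" : String).toList = ['N','v','a'] := by decide
  have eN' : ("NVA" : String).toList = ['N','V','A'] := by decide
  have eB : ("Baa" : String).toList = ['B','a','a'] := by decide
  have eB' : ("BAA" : String).toList = ['B','A','A'] := by decide
  have eE : ("Ecd" : String).toList = ['E','c','d'] := by decide
  have eE' : ("ECD" : String).toList = ['E','C','D'] := by decide
  have eA : ("Acd" : String).toList = ['A','c','d'] := by decide
  have eA' : ("ACD" : String).toList = ['A','C','D'] := by decide
  rw [eS, eS', eN, eN', eB, eB', eE, eE', eA, eA']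
  rw [replace_eq_repl _ _ _ (by simp), replace_eq_repl _ _ _ (by simp),
      replace_eq_repl _ _ _ (by simp), replace_eq_repl _ _ _ (by simp),
      replace_eq_repl _ _ _ (by simp)]
  exact chain_aux text.toList.length text.toList le_rfl d1 d2 d3

theorem apply_acronyms_changed : Claim_changed_apply_acronyms := by
  unfold Claim_changed_apply_acronyms; decide

theorem apply_acronyms_tight : Claim_exact_apply_acronyms := by
  intro text _ hD
  unfold D_apply_acronyms at hD
  intro h
  have hit : (PySem.Dict.ofList [(("Sra" : String), ("SRA" : String)), ("Nva", "NVA"),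
      ("Baa", "BAA"), ("Ecd", "ECD"), ("Acd", "ACD")]).items
      = [("Sra", "SRA"), ("Nva", "NVA"), ("Baa", "BAA"), ("Ecd", "ECD"), ("Acd", "ACD")] := by decide
  simp only [apply_acronyms, apply_acronyms_alt, hit, List.foldl, PySem.Str.replace] at h
  have h' := congrArg String.toList h
  simp only [String.toList_ofList] at h'
  rw [show ("Sra" : String).toList = ['S','r','a'] from by decide,
      show ("SRA" : String).toList = ['S','R','A'] from by decide,
      show ("Nva" : String).toList = ['N','v','a'] from by decide,
      show ("NVA" : String).toList = ['N','V','A'] from by decide,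
      show ("Baa" : String).toList = ['B','a','a'] from by decide,
      show ("BAA" : String).toList = ['B','A','A'] from by decide,
      show ("Ecd" : String).toList = ['E','c','d'] from by decide,
      show ("ECD" : String).toList = ['E','C','D'] from by decide,
      show ("Acd" : String).toList = ['A','c','d'] from by decide,
      show ("ACD" : String).toList = ['A','C','D'] from by decide] at h'
  rw [replace_eq_repl _ _ _ (by simp), replace_eq_repl _ _ _ (by simp),
      replace_eq_repl _ _ _ (by simp), replace_eq_repl _ _ _ (by simp),
      replace_eq_repl _ _ _ (by simp)] at h'
  exact tight_aux text.toList.length text.toList le_rfl hD h'
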